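-- pv_equiv track=rewrite | github.com/ODCS1/PersonalTechStudies | python/exercicios/lista8/ex12.py | posicao_mais_a_direita_for
-- ===== SOURCE A (Python) =====
-- def posicao_mais_a_direita_for(tupla_numeros: tuple[int], numeros_procurados: tuple[int]) -> int:
--     if not (isinstance(tupla_numeros, tuple) and isinstance(numeros_procurados, tuple)):
--         raise ValueError("Os argumentos do parâmetro eram esperados como tuplas de inteiros!")
--
--     posicao = -1
--     for i in range(len(tupla_numeros) - 1, -1, -1):
--         if tupla_numeros[i] in numeros_procurados:
--             posicao = i
--             break
--     return posicao
-- ===== SOURCE B (Python) =====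
-- def posicao_mais_a_direita_for(tupla_numeros: tuple, numeros_procurados: tuple) -> int:
--     if not (isinstance(tupla_numeros, tuple) and isinstance(numeros_procurados, tuple)):
--         raise ValueError("Os argumentos do parâmetro eram esperados como tuplas de inteiros!")
--
--     procurados = set(numeros_procurados)
--     posicao = -1
--     for i, x in enumerate(tupla_numeros):
--         if x in procurados:
--             posicao = i
--     return posicao
-- ===== Notes on version B (the rewrite author's own statement) =====
-- stated objective: alternative
-- what changed: Replaced the backward range(len-1,-1,-1) scan with early break by a forward enumerate full pass over a precomputed set of the searched numbers, overwriting posicao on every match so the last overwrite is the rightmost index.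
import Mathlib
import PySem

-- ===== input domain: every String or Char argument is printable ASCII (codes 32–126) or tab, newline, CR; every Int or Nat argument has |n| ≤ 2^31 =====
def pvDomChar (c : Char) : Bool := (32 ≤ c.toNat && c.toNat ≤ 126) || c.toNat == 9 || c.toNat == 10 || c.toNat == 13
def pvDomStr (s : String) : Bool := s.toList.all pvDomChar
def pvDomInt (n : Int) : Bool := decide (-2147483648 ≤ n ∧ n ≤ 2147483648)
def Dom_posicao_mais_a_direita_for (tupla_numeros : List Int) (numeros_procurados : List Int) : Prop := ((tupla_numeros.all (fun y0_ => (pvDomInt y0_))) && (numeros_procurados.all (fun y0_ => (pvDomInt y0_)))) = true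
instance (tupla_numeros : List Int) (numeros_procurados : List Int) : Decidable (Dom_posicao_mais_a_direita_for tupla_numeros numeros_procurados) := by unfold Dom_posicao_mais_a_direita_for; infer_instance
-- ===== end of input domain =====

-- B replaces A's backward early-break scan by a forward enumerate pass that keeps the last match (alternative decomposition, same cost).
-- The isinstance tuple check of A always passes under the type convention and is not ported.

-- ===== PORT A =====
-- A's for-loop over range(len-1, -1, -1) with break: first index of the range whose
-- element is in numeros_procurados, else the initial -1.
def pvALoop (tupla_numeros : List Int) (numeros_procurados : List Int) : List Int → Int
  | [] => -1
  | i :: rest =>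
      if ((PySem.List.pyGet? tupla_numeros i).any fun x => numeros_procurados.contains x) then i
      else pvALoop tupla_numeros numeros_procurados rest

def posicao_mais_a_direita_for (tupla_numeros : List Int) (numeros_procurados : List Int) : Int :=
  pvALoop tupla_numeros numeros_procurados
    (PySem.List.pyRange ((tupla_numeros.length : Int) - 1) (-1) (-1))

-- ===== PORT B =====
-- B's forward pass: procurados = set(numeros_procurados); for i, x in enumerate(tupla): if x in procurados: posicao = i
def posicao_mais_a_direita_for_alt (tupla_numeros : List Int) (numeros_procurados : List Int) : Int :=
  let procurados := PySem.Set.ofList numeros_procurados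
  (PySem.List.enumerate tupla_numeros).foldl
    (fun posicao ix => if procurados.contains ix.2 then ix.1 else posicao) (-1)

-- ===== PRECONDITION & SPEC =====
def Spec_posicao_mais_a_direita_for (tupla_numeros : List Int) (numeros_procurados : List Int) (out : Int) : Prop := out = posicao_mais_a_direita_for_alt tupla_numeros numeros_procurados
instance (tupla_numeros : List Int) (numeros_procurados : List Int) (out : Int) : Decidable (Spec_posicao_mais_a_direita_for tupla_numeros numeros_procurados out) := by unfold Spec_posicao_mais_a_direita_for; infer_instance

-- ===== CLAIM (what is proved, stated in full; the proofs are below) =====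
def Claim_equal_posicao_mais_a_direita_for : Prop := ∀ (tupla_numeros : List Int) (numeros_procurados : List Int), Dom_posicao_mais_a_direita_for tupla_numeros numeros_procurados → Spec_posicao_mais_a_direita_for tupla_numeros numeros_procurados (posicao_mais_a_direita_for tupla_numeros numeros_procurados)

-- ===== LEMMAS AND PROOFS =====

-- the descending index list in map form
lemma pvDesc_eq (n : Nat) :
    PySem.List.pyRange ((n : Int) - 1) (-1) (-1)
      = (List.range n).map (fun (k : Nat) => (n : Int) - 1 - (k : Int)) := by
  unfold PySem.List.pyRange
  rcases Nat.eq_zero_or_pos n with h | h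
  · subst h; norm_num
  · have h1 : ¬ ((0:Int) < -1) := by decide
    have h2 : (-1:Int) < (n : Int) - 1 := by omega
    rw [if_neg (by decide : ¬ ((-1:Int) = 0)), if_neg h1, if_pos h2]
    have hc : (((n : Int) - 1 - -1 + - -1 - 1) / - -1).toNat = n := by
      norm_num
    rw [hc]
    dsimp only
    apply List.map_congr_left
    intro k _
    ring

-- cons step of the descending list
lemma pvDesc_cons (n : Nat) :
    PySem.List.pyRange (((n + 1 : Nat) : Int) - 1) (-1) (-1)
      = (n : Int) :: PySem.List.pyRange ((n : Int) - 1) (-1) (-1) := by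
  rw [pvDesc_eq (n + 1), pvDesc_eq n, List.range_succ_eq_map]
  rw [List.map_cons, List.map_map]
  refine List.cons_eq_cons.mpr ⟨by push_cast; ring, ?_⟩
  apply List.map_congr_left
  intro k _
  simp only [Function.comp]
  push_cast; ring

-- indices strictly below l.length see only l in l ++ [x]
lemma pvALoop_append (l : List Int) (x : Int) (p : List Int) (idxs : List Int)
    (h : ∀ i ∈ idxs, 0 ≤ i ∧ i < (l.length : Int)) :
    pvALoop (l ++ [x]) p idxs = pvALoop l p idxs := by
  induction idxs with
  | nil => rfl
  | cons i rest ih =>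
      have hi := h i (by simp)
      have hget : PySem.List.pyGet? (l ++ [x]) i = PySem.List.pyGet? l i := by
        rw [PySem.List.pyGet?_of_nonneg (l ++ [x]) hi.1,
            PySem.List.pyGet?_of_nonneg l hi.1]
        rw [List.getElem?_append_left (by omega)]
      simp only [pvALoop, hget]
      split_ifs with hc
      · rfl
      · exact ih (fun j hj => h j (by simp [hj]))

-- every member of the descending list is a valid index below n
lemma pvDesc_mem (n : Nat) (i : Int)
    (h : i ∈ PySem.List.pyRange ((n : Int) - 1) (-1) (-1)) : 0 ≤ i ∧ i < (n : Int) := by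
  rw [pvDesc_eq] at h
  simp only [List.mem_map] at h
  obtain ⟨k, hk, rfl⟩ := h
  simp only [List.mem_range] at hk
  omega

-- B on l ++ [x]
lemma pvAlt_append (l : List Int) (x : Int) (p : List Int) :
    posicao_mais_a_direita_for_alt (l ++ [x]) p
      = if p.contains x then (l.length : Int)
        else posicao_mais_a_direita_for_alt l p := by
  unfold posicao_mais_a_direita_for_alt
  rw [PySem.List.enumerate_append]
  rw [List.foldl_append]
  simp [PySem.List.enumerate_cons, PySem.List.enumerate_nil, List.foldl]

-- A on l ++ [x]
lemma pvA_append (l : List Int) (x : Int) (p : List Int) :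
    posicao_mais_a_direita_for (l ++ [x]) p
      = if p.contains x then (l.length : Int)
        else posicao_mais_a_direita_for l p := by
  unfold posicao_mais_a_direita_for
  have hlen : ((l ++ [x]).length : Int) - 1 = ((l.length + 1 : Nat) : Int) - 1 := by
    simp
  rw [hlen, pvDesc_cons]
  have hget : PySem.List.pyGet? (l ++ [x]) (l.length : Int) = some x := by
    rw [PySem.List.pyGet?_of_nonneg (l ++ [x]) (by positivity)]
    simp
  simp only [pvALoop, hget, Option.any_some]
  split_ifs with hc
  · rfl
  · exact pvALoop_append l x p _ (fun i hi => pvDesc_mem l.length i hi)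

lemma pvAB (l : List Int) (p : List Int) :
    posicao_mais_a_direita_for l p = posicao_mais_a_direita_for_alt l p := by
  induction l using List.reverseRecOn with
  | nil => rfl
  | append_singleton l x ih =>
      rw [pvA_append, pvAlt_append, ih]

-- ===== VERDICT (by name: the statement is the Claim_ definition above) =====
theorem posicao_mais_a_direita_for_spec : Claim_equal_posicao_mais_a_direita_for := by
  intro t p _
  exact pvAB t p
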